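-- pv_equiv track=rewrite | github.com/saihaspa/codemind-python | Split_a_String_in_Balanced_Strings.py | balanced_string_split
-- ===== SOURCE A (Python) =====
-- def balanced_string_split(s):
--     e=0
--     ares=0
--     max=0
--     for char in s:
--         if char=='L':
--             e+=1
--         else:
--             ares+=1
--         if e==ares:
--             max+=1
--             e=0
--             ares= 0
--     return max
-- ===== SOURCE B (Python) =====
-- def _after_first_balanced(t):
--     # Remainder of t after its shortest balanced prefix, or None if t has no balanced prefix.
--     bal = 0
--     for i, ch in enumerate(t):
--         bal += 1 if ch == 'L' else -1
--         if bal == 0: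
--             return t[i + 1:]
--     return None
--
--
-- def balanced_string_split(s):
--     # Greedy chunk decomposition: repeatedly strip the shortest balanced prefix
--     # and count how many chunks can be stripped before none remains.
--     count = 0
--     rest = s
--     while True:
--         nxt = _after_first_balanced(rest)
--         if nxt is None:
--             return count
--         count += 1
--         rest = nxt
-- ===== Notes on version B (the rewrite author's own statement) =====
-- stated objective: alternative
-- what changed: Replaces A's single pass with reset-on-match counters by a greedy chunk decomposition: a helper strips the shortest balanced prefix, and an outer loop counts how many chunks can be stripped.
import Mathlib
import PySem

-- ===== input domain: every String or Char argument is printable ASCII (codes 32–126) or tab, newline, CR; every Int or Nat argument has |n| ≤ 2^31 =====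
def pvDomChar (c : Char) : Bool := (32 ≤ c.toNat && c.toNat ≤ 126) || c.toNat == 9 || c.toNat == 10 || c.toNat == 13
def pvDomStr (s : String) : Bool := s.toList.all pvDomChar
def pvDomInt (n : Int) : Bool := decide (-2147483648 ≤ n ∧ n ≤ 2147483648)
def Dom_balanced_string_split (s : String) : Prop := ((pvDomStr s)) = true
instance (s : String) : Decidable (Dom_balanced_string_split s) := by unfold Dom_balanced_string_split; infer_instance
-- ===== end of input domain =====

-- B replaces A's reset-on-match counting pass by a greedy chunk decomposition (strip the shortest balanced prefix, count the chunks); same cost, different decomposition.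
-- ===== PORT A =====
def pvALoop : List Char → Int → Int → Int → Int
  | [], _, _, mx => mx
  | c :: cs, e, ares, mx =>
    let e' := if c = 'L' then e + 1 else e
    let ares' := if c = 'L' then ares else ares + 1
    if e' = ares' then pvALoop cs 0 0 (mx + 1) else pvALoop cs e' ares' mx

def balanced_string_split (s : String) : Int := pvALoop s.toList 0 0 0

-- ===== PORT B =====
-- helper _after_first_balanced: remainder after the shortest balanced prefix, or none
def pvAfterFirst : List Char → Int → Option (List Char)
  | [], _ => none
  | c :: cs, bal =>
    let b := bal + (if c = 'L' then 1 else -1)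
    if b = 0 then some cs else pvAfterFirst cs b

theorem pvAfterFirst_length : ∀ (l : List Char) (b : Int) (r : List Char),
    pvAfterFirst l b = some r → r.length < l.length := by
  intro l
  induction l with
  | nil => intro b r h; simp [pvAfterFirst] at h
  | cons c cs ih =>
    intro b r h
    simp only [pvAfterFirst] at h
    by_cases hb : b + (if c = 'L' then 1 else -1) = 0
    · rw [if_pos hb] at h
      cases h
      simp
    · rw [if_neg hb] at h
      exact Nat.lt_trans (ih _ r h) (by simp)

-- the while loop of balanced_string_split in Source B
def pvBLoop (rest : List Char) (count : Int) : Int :=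
  match h : pvAfterFirst rest 0 with
  | none => count
  | some nxt => pvBLoop nxt (count + 1)
termination_by rest.length
decreasing_by exact pvAfterFirst_length rest 0 nxt h

def balanced_string_split_alt (s : String) : Int := pvBLoop s.toList 0

-- ===== PRECONDITION & SPEC =====
def Spec_balanced_string_split (s : String) (out : Int) : Prop := out = balanced_string_split_alt s
instance (s : String) (out : Int) : Decidable (Spec_balanced_string_split s out) := by unfold Spec_balanced_string_split; infer_instance

-- ===== CLAIM (what is proved, stated in full; the proofs are below) =====
def Claim_equal_balanced_string_split : Prop := ∀ (s : String), Dom_balanced_string_split s → Spec_balanced_string_split s (balanced_string_split s)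

-- ===== LEMMAS AND PROOFS =====
theorem pvBLoop_eq (rest : List Char) (count : Int) :
    pvBLoop rest count =
      (match pvAfterFirst rest 0 with
       | none => count
       | some nxt => pvBLoop nxt (count + 1)) := by
  rw [pvBLoop]
  rcases h : pvAfterFirst rest 0 with _ | nxt <;> simp [h]

theorem pvALoop_eq (cs : List Char) : ∀ (e ares mx : Int),
    pvALoop cs e ares mx =
      (match pvAfterFirst cs (e - ares) with
       | none => mx
       | some r => pvBLoop r (mx + 1)) := by
  induction cs with
  | nil => intro e ares mx; simp [pvALoop, pvAfterFirst]
  | cons c cs ih =>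
    intro e ares mx
    by_cases hc : c = 'L' <;>
      simp only [pvALoop, pvAfterFirst, hc, reduceIte]
    · by_cases h : e + 1 = ares
      · have hb : e - ares + 1 = 0 := by omega
        rw [if_pos h, if_pos hb, ih 0 0 (mx + 1)]
        simp only [sub_self]
        exact (pvBLoop_eq cs (mx + 1)).symm
      · have hb : ¬ (e - ares + 1 = 0) := by omega
        rw [if_neg h, if_neg hb, ih (e + 1) ares mx]
        have : e + 1 - ares = e - ares + 1 := by omega
        rw [this]
    · by_cases h : e = ares + 1
      · have hb : e - ares + -1 = 0 := by omega
        rw [if_pos h, if_pos hb, ih 0 0 (mx + 1)]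
        simp only [sub_self]
        exact (pvBLoop_eq cs (mx + 1)).symm
      · have hb : ¬ (e - ares + -1 = 0) := by omega
        rw [if_neg h, if_neg hb, ih e (ares + 1) mx]
        have : e - (ares + 1) = e - ares + -1 := by omega
        rw [this]

-- ===== VERDICT (by name: the statement is the Claim_ definition above) =====
theorem balanced_string_split_spec : Claim_equal_balanced_string_split := by
  intro s _
  unfold Spec_balanced_string_split balanced_string_split balanced_string_split_alt
  rw [pvALoop_eq s.toList 0 0 0, pvBLoop_eq s.toList 0]
  simp only [sub_zero]
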